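-- pv_equiv track=rewrite | github.com/pypi-data/pypi-mirror-395 | packages/wistx-mcp/wistx_mcp-1.0.71.tar.gz/wistx_mcp-1.0.71/wistx_mcp/tools/lib/integration_generator.py | _generate_implementation_guidance
-- ===== SOURCE A (Python) =====
-- from typing import Any
--
-- def _generate_implementation_guidance(
--
--     components: list[dict[str, Any]],
--     integration_type: str,
--     cloud_provider: str,
--     pattern_name: str | None,
-- ) -> list[str]:
--     """Generate step-by-step implementation guidance.
--
--     Args:
--         components: List of components
--         integration_type: Type of integration
--         cloud_provider: Cloud provider
--         pattern_name: Optional pattern name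
--
--     Returns:
--         List of implementation steps
--     """
--     component_names = [comp.get("id", comp.get("type", "component")) for comp in components]
--     guidance = []
--
--     if integration_type == "networking":
--         guidance.append(f"1. Identify network requirements between {', '.join(component_names)}")
--         if cloud_provider == "aws":
--             guidance.append("2. Create or configure VPC and subnets")
--             guidance.append("3. Configure security groups with least privilege rules")
--             guidance.append("4. Set up route tables and network ACLs")
--             guidance.append("5. Test connectivity between components")
--         elif cloud_provider == "kubernetes":
--             guidance.append("2. Configure network policies for pod-to-pod communication")
--             guidance.append("3. Set up service mesh (Istio/Linkerd) if needed")
--             guidance.append("4. Configure ingress/egress rules")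
--             guidance.append("5. Verify network connectivity")
--
--     if integration_type == "security":
--         guidance.append(f"1. Create IAM roles/service accounts for {', '.join(component_names)}")
--         guidance.append("2. Configure least privilege access policies")
--         guidance.append("3. Set up secrets management (AWS Secrets Manager, HashiCorp Vault, etc.)")
--         guidance.append("4. Enable encryption at rest and in transit")
--         guidance.append("5. Configure audit logging")
--         guidance.append("6. Test access controls")
--
--     if integration_type == "service":
--         guidance.append(f"1. Configure service discovery for {', '.join(component_names)}")
--         guidance.append("2. Set up load balancing")
--         guidance.append("3. Implement health check endpoints")
--         guidance.append("4. Configure retry logic and circuit breakers")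
--         guidance.append("5. Set up API gateway if needed")
--         guidance.append("6. Test service communication")
--
--     if integration_type == "monitoring":
--         guidance.append(f"1. Install monitoring agents on {', '.join(component_names)}")
--         guidance.append("2. Configure metrics collection")
--         guidance.append("3. Set up log aggregation")
--         guidance.append("4. Create dashboards for visualization")
--         guidance.append("5. Configure alerting rules")
--         guidance.append("6. Test monitoring pipeline")
--
--     if pattern_name:
--         guidance.append(f"\nNote: Consider using the '{pattern_name}' pattern for this integration type.")
--
--     return guidance
-- ===== SOURCE B (Python) =====
-- # B: stores UNNUMBERED step bodies; select bodies first, then a separate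
-- # numbering pass formats "N. body"; the note is appended last.
--
-- _NET_TAILS = {
--     "aws": [
--         "Create or configure VPC and subnets",
--         "Configure security groups with least privilege rules",
--         "Set up route tables and network ACLs",
--         "Test connectivity between components",
--     ],
--     "kubernetes": [
--         "Configure network policies for pod-to-pod communication",
--         "Set up service mesh (Istio/Linkerd) if needed",
--         "Configure ingress/egress rules",
--         "Verify network connectivity",
--     ],
-- }
--
-- _FIRST = {
--     "networking": "Identify network requirements between ",
--     "security": "Create IAM roles/service accounts for ",
--     "service": "Configure service discovery for ",
--     "monitoring": "Install monitoring agents on ",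
-- }
--
-- _TAILS = {
--     "security": [
--         "Configure least privilege access policies",
--         "Set up secrets management (AWS Secrets Manager, HashiCorp Vault, etc.)",
--         "Enable encryption at rest and in transit",
--         "Configure audit logging",
--         "Test access controls",
--     ],
--     "service": [
--         "Set up load balancing",
--         "Implement health check endpoints",
--         "Configure retry logic and circuit breakers",
--         "Set up API gateway if needed",
--         "Test service communication",
--     ],
--     "monitoring": [
--         "Configure metrics collection",
--         "Set up log aggregation",
--         "Create dashboards for visualization",
--         "Configure alerting rules",
--         "Test monitoring pipeline",
--     ],
-- }
--
--
-- def _generate_implementation_guidance(components, integration_type, cloud_provider, pattern_name):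
--     names = ", ".join(c.get("id", c.get("type", "component")) for c in components)
--     if integration_type in _FIRST:
--         tails = _NET_TAILS.get(cloud_provider, []) if integration_type == "networking" else _TAILS[integration_type]
--         bodies = [_FIRST[integration_type] + names] + tails
--     else:
--         bodies = []
--     guidance = [f"{i}. {s}" for i, s in enumerate(bodies, 1)]
--     if pattern_name:
--         guidance.append(f"\nNote: Consider using the '{pattern_name}' pattern for this integration type.")
--     return guidance
-- ===== Notes on version B (the rewrite author's own statement) =====
-- stated objective: simpler
-- what changed: B stores only unnumbered step bodies (selected per integration_type / cloud_provider) and produces the '1.'/'2.' numbering in a separate enumerate-based formatting pass, instead of A's four if-blocks appending pre-numbered literal strings.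
import Mathlib
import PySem

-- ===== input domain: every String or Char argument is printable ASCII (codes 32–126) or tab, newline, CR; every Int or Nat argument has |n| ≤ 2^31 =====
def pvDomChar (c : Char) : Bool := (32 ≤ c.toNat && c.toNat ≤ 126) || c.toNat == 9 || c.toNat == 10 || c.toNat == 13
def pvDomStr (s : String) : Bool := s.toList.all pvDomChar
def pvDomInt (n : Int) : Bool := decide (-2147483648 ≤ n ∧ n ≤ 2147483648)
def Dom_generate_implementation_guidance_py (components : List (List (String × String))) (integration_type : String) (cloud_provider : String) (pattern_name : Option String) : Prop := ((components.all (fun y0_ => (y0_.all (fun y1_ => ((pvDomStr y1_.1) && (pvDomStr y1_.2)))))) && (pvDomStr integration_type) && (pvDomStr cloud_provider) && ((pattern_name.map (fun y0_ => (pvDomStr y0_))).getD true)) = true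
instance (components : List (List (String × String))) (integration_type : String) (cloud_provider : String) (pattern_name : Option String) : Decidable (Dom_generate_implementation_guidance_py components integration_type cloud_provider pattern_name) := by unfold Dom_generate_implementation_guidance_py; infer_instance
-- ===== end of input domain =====

-- ===== PORT A =====
-- one honest line: B selects UNNUMBERED step bodies from tables and adds the "N. " numbering in a separate formatting pass; objective: simpler.
def generate_implementation_guidance_py (components : List (List (String × String))) (integration_type : String) (cloud_provider : String) (pattern_name : Option String) : List String :=
  let component_names := components.map (fun comp =>
    PySem.Dict.getD (PySem.Dict.ofList comp) "id" (PySem.Dict.getD (PySem.Dict.ofList comp) "type" "component"))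
  let guidance : List String := []
  let guidance :=
    if integration_type == "networking" then
      let guidance := guidance ++ ["1. Identify network requirements between " ++ PySem.Str.join ", " component_names]
      if cloud_provider == "aws" then
        guidance ++ ["2. Create or configure VPC and subnets",
                     "3. Configure security groups with least privilege rules",
                     "4. Set up route tables and network ACLs",
                     "5. Test connectivity between components"]
      else if cloud_provider == "kubernetes" then
        guidance ++ ["2. Configure network policies for pod-to-pod communication",
                     "3. Set up service mesh (Istio/Linkerd) if needed",
                     "4. Configure ingress/egress rules",
                     "5. Verify network connectivity"]
      else guidance
    else guidance
  let guidance :=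
    if integration_type == "security" then
      guidance ++ ["1. Create IAM roles/service accounts for " ++ PySem.Str.join ", " component_names,
                   "2. Configure least privilege access policies",
                   "3. Set up secrets management (AWS Secrets Manager, HashiCorp Vault, etc.)",
                   "4. Enable encryption at rest and in transit",
                   "5. Configure audit logging",
                   "6. Test access controls"]
    else guidance
  let guidance :=
    if integration_type == "service" then
      guidance ++ ["1. Configure service discovery for " ++ PySem.Str.join ", " component_names,
                   "2. Set up load balancing",
                   "3. Implement health check endpoints",
                   "4. Configure retry logic and circuit breakers",
                   "5. Set up API gateway if needed",
                   "6. Test service communication"]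
    else guidance
  let guidance :=
    if integration_type == "monitoring" then
      guidance ++ ["1. Install monitoring agents on " ++ PySem.Str.join ", " component_names,
                   "2. Configure metrics collection",
                   "3. Set up log aggregation",
                   "4. Create dashboards for visualization",
                   "5. Configure alerting rules",
                   "6. Test monitoring pipeline"]
    else guidance
  match pattern_name with
  | some p => if p == "" then guidance else
      guidance ++ ["\nNote: Consider using the '" ++ p ++ "' pattern for this integration type."]
  | none => guidance

-- ===== PORT B =====
-- unnumbered networking continuations keyed by cloud_provider
def pvNetTails : PySem.Dict String (List String) :=
  PySem.Dict.mk [("aws",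
      ["Create or configure VPC and subnets",
       "Configure security groups with least privilege rules",
       "Set up route tables and network ACLs",
       "Test connectivity between components"]),
   ("kubernetes",
      ["Configure network policies for pod-to-pod communication",
       "Set up service mesh (Istio/Linkerd) if needed",
       "Configure ingress/egress rules",
       "Verify network connectivity"])]

-- integration_type -> prefix of the first (templated) step body
def pvFirst : PySem.Dict String String :=
  PySem.Dict.mk [("networking", "Identify network requirements between "),
   ("security", "Create IAM roles/service accounts for "),
   ("service", "Configure service discovery for "),
   ("monitoring", "Install monitoring agents on ")]

-- integration_type -> unnumbered remaining step bodies (non-networking)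
def pvTails : PySem.Dict String (List String) :=
  PySem.Dict.mk [("security",
      ["Configure least privilege access policies",
       "Set up secrets management (AWS Secrets Manager, HashiCorp Vault, etc.)",
       "Enable encryption at rest and in transit",
       "Configure audit logging",
       "Test access controls"]),
   ("service",
      ["Set up load balancing",
       "Implement health check endpoints",
       "Configure retry logic and circuit breakers",
       "Set up API gateway if needed",
       "Test service communication"]),
   ("monitoring",
      ["Configure metrics collection",
       "Set up log aggregation",
       "Create dashboards for visualization",
       "Configure alerting rules",
       "Test monitoring pipeline"])]

-- numbering pass: [f"{i}. {s}" for i, s in enumerate(bodies, 1)]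
def pvNumberFrom (i : Int) : List String → List String
  | [] => []
  | s :: rest => (PySem.Int.toStr i ++ ". " ++ s) :: pvNumberFrom (i + 1) rest

def generate_implementation_guidance_py_alt (components : List (List (String × String))) (integration_type : String) (cloud_provider : String) (pattern_name : Option String) : List String :=
  let names := PySem.Str.join ", " (components.map (fun comp =>
    PySem.Dict.getD (PySem.Dict.ofList comp) "id" (PySem.Dict.getD (PySem.Dict.ofList comp) "type" "component")))
  let bodies :=
    match PySem.Dict.get? pvFirst integration_type with
    | some pre =>
      let tails := if integration_type == "networking"
        then PySem.Dict.getD pvNetTails cloud_provider []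
        else PySem.Dict.getD pvTails integration_type []
      (pre ++ names) :: tails
    | none => []
  let guidance := pvNumberFrom 1 bodies
  match pattern_name with
  | some p => if p == "" then guidance else
      guidance ++ ["\nNote: Consider using the '" ++ p ++ "' pattern for this integration type."]
  | none => guidance

-- ===== PRECONDITION & SPEC =====
def Spec_generate_implementation_guidance_py (components : List (List (String × String))) (integration_type : String) (cloud_provider : String) (pattern_name : Option String) (out : List String) : Prop := out = generate_implementation_guidance_py_alt components integration_type cloud_provider pattern_name
instance (components : List (List (String × String))) (integration_type : String) (cloud_provider : String) (pattern_name : Option String) (out : List String) : Decidable (Spec_generate_implementation_guidance_py components integration_type cloud_provider pattern_name out) := by unfold Spec_generate_implementation_guidance_py; infer_instance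

-- ===== CLAIM (what is proved, stated in full; the proofs are below) =====
def Claim_equal_generate_implementation_guidance_py : Prop := ∀ (components : List (List (String × String))) (integration_type : String) (cloud_provider : String) (pattern_name : Option String), Dom_generate_implementation_guidance_py components integration_type cloud_provider pattern_name → Spec_generate_implementation_guidance_py components integration_type cloud_provider pattern_name (generate_implementation_guidance_py components integration_type cloud_provider pattern_name)

-- ===== LEMMAS AND PROOFS =====
-- peel a fixed numbering prefix off a templated step: lit ++ s = toStr n ++ ". " ++ (pre ++ s)
theorem pv_step (n : Int) (pre lit : String) (h : PySem.Int.toStr n ++ ". " ++ pre = lit) (s : String) :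
    lit ++ s = PySem.Int.toStr n ++ ". " ++ (pre ++ s) := by
  rw [← h, String.append_assoc]

-- ===== VERDICT (by name: the statement is the Claim_ definition above) =====
theorem generate_implementation_guidance_py_spec : Claim_equal_generate_implementation_guidance_py := by
  intro components integration_type cloud_provider pattern_name _
  unfold Spec_generate_implementation_guidance_py
  unfold generate_implementation_guidance_py generate_implementation_guidance_py_alt
  simp only [pvNetTails, pvFirst, pvTails, PySem.Dict.getD, PySem.Dict.get?]
  by_cases h1 : integration_type = "networking"
  · subst h1
    by_cases h5 : cloud_provider = "aws"
    · subst h5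
      cases pattern_name <;> simp [pvNumberFrom] <;> (try split_ifs) <;> (try simp) <;> and_intros <;>
        first | exact pv_step 1 _ _ (by decide) _ | decide
    · by_cases h6 : cloud_provider = "kubernetes"
      · subst h6
        cases pattern_name <;> simp [pvNumberFrom] <;> (try split_ifs) <;> (try simp) <;> and_intros <;>
        first | exact pv_step 1 _ _ (by decide) _ | decide
      · have h5' : ("aws" == cloud_provider) = false :=
          beq_eq_false_iff_ne.mpr (fun h => h5 h.symm)
        have h6' : ("kubernetes" == cloud_provider) = false :=
          beq_eq_false_iff_ne.mpr (fun h => h6 h.symm)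
        cases pattern_name <;> simp [h5, h6, h5', h6', List.find?, pvNumberFrom] <;> (try split_ifs) <;> (try simp) <;> and_intros <;>
        first | exact pv_step 1 _ _ (by decide) _ | decide
  · by_cases h2 : integration_type = "security"
    · subst h2
      cases pattern_name <;> simp [pvNumberFrom] <;> (try split_ifs) <;> (try simp) <;> and_intros <;>
        first | exact pv_step 1 _ _ (by decide) _ | decide
    · by_cases h3 : integration_type = "service"
      · subst h3
        cases pattern_name <;> simp [pvNumberFrom] <;> (try split_ifs) <;> (try simp) <;> and_intros <;>
        first | exact pv_step 1 _ _ (by decide) _ | decide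
      · by_cases h4 : integration_type = "monitoring"
        · subst h4
          cases pattern_name <;> simp [pvNumberFrom] <;> (try split_ifs) <;> (try simp) <;> and_intros <;>
        first | exact pv_step 1 _ _ (by decide) _ | decide
        · have h1' : ("networking" == integration_type) = false :=
            beq_eq_false_iff_ne.mpr (fun h => h1 h.symm)
          have h2' : ("security" == integration_type) = false :=
            beq_eq_false_iff_ne.mpr (fun h => h2 h.symm)
          have h3' : ("service" == integration_type) = false :=
            beq_eq_false_iff_ne.mpr (fun h => h3 h.symm)
          have h4' : ("monitoring" == integration_type) = false :=
            beq_eq_false_iff_ne.mpr (fun h => h4 h.symm)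
          cases pattern_name <;>
            simp [h1, h2, h3, h4, h1', h2', h3', h4', List.find?, pvNumberFrom] <;> (try split_ifs) <;> (try simp) <;> and_intros <;>
        first | exact pv_step 1 _ _ (by decide) _ | decide
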